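-- pv_equiv track=rewrite | github.com/pypi-data/pypi-mirror-318 | packages/dgNova/dgNova-1.0.0-py3-none-any.whl/dgNova/designs/layouts.py | generate_triple_lattice
-- ===== SOURCE A (Python) =====
-- from typing import List, Tuple, Optional
--
-- def generate_triple_lattice(k: int) -> List[List[List[int]]]:
--     """
--     Generate layout for triple lattice design (k×k, 3 reps)
--
--     Parameters
--     ----------
--     k : int
--         Block size (sqrt of number of treatments)
--
--     Returns
--     -------
--     List[List[List[int]]]
--         Layout for each replication
--     """
--     treatments = k * k
--
--     # First replication - sequential
--     rep1 = []
--     for i in range(0, treatments, k):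
--         rep1.append(list(range(i, i + k)))
--
--     # Second replication - cyclic development
--     rep2 = []
--     for i in range(k):
--         block = []
--         for j in range(k):
--             treatment = (i + j * k) % treatments
--             block.append(treatment)
--         rep2.append(block)
--
--     # Third replication - modified cyclic
--     rep3 = []
--     for i in range(k):
--         block = []
--         for j in range(k):
--             treatment = (i * k + j * (k + 1)) % treatments
--             block.append(treatment)
--         rep3.append(block)
--
--     return [rep1, rep2, rep3]
-- ===== SOURCE B (Python) =====
-- def generate_triple_lattice(k: int):
--     """Build each replication by additive development: generate the first row by
--     repeatedly adding a column step mod k*k, then derive each subsequent row from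
--     the previous one by adding a row step mod k*k elementwise."""
--     m = k * k
--
--     def first_row(col_step):
--         row = []
--         x = 0
--         for _ in range(k):
--             row.append(x)
--             x = (x + col_step) % m
--         return row
--
--     def develop(start_row, row_step):
--         rows = []
--         row = start_row
--         for _ in range(k):
--             rows.append(row)
--             row = [(x + row_step) % m for x in row]
--         return rows
--
--     return [develop(first_row(1), k),
--             develop(first_row(k), 1),
--             develop(first_row(k + 1), k)]
-- ===== Notes on version B (the rewrite author's own statement) =====
-- stated objective: alternative
-- what changed: Replaces A's index-formula loops (sequential range blocks and two nested (i,j) modular formulas) by additive cyclic development: each first row is generated by repeated addition of a column step mod k^2, and each next row is obtained from the previous row by adding a row step mod k^2 elementwise, so no entry is computed from its indices.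
-- outside the precondition, e.g. on generate_triple_lattice(0): A raises ValueError, B returns [[], [], []]
import Mathlib
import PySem

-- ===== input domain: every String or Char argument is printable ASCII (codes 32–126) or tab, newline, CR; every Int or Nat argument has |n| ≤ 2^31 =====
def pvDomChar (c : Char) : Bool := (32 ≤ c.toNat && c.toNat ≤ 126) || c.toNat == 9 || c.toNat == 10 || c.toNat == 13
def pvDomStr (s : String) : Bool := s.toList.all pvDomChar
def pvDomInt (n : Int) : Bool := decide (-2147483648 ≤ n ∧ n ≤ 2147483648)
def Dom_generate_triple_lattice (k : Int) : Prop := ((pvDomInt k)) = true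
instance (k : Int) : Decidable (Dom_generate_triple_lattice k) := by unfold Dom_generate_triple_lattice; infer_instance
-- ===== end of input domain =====

-- B builds each replication by additive cyclic development (first row by repeated
-- addition of a column step mod k², next rows by elementwise addition of a row step
-- mod k²) instead of A's per-index formulas (objective: alternative). Return value only.

-- ===== PORT A =====
def generate_triple_lattice (k : Int) : List (List (List Int)) :=
  let treatments := k * k
  -- First replication - sequential
  let rep1 := (PySem.List.pyRange 0 treatments k).foldl
    (fun acc i => acc ++ [PySem.List.pyRange i (i + k) 1]) []
  -- Second replication - cyclic development
  let rep2 := (PySem.List.pyRange 0 k 1).foldl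
    (fun acc i => acc ++
      [(PySem.List.pyRange 0 k 1).foldl
        (fun block j => block ++ [PySem.Int.mod (i + j * k) treatments]) []]) []
  -- Third replication - modified cyclic
  let rep3 := (PySem.List.pyRange 0 k 1).foldl
    (fun acc i => acc ++
      [(PySem.List.pyRange 0 k 1).foldl
        (fun block j => block ++ [PySem.Int.mod (i * k + j * (k + 1)) treatments]) []]) []
  [rep1, rep2, rep3]

-- ===== PORT B =====
def generate_triple_lattice_alt (k : Int) : List (List (List Int)) :=
  let m := k * k
  let first_row := fun (colStep : Int) =>
    ((PySem.List.pyRange 0 k 1).foldl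
      (fun (st : List Int × Int) _ => (st.1 ++ [st.2], PySem.Int.mod (st.2 + colStep) m))
      ([], 0)).1
  let develop := fun (startRow : List Int) (rowStep : Int) =>
    ((PySem.List.pyRange 0 k 1).foldl
      (fun (st : List (List Int) × List Int) _ =>
        (st.1 ++ [st.2], st.2.map (fun x => PySem.Int.mod (x + rowStep) m)))
      ([], startRow)).1
  [develop (first_row 1) k, develop (first_row k) 1, develop (first_row (k + 1)) k]

-- ===== PRECONDITION & SPEC =====
-- Pre_ excludes only k = 0, where A's range(0, 0, 0) raises ValueError (step must not be zero).
def Pre_generate_triple_lattice (k : Int) : Prop := k ≠ 0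
instance (k : Int) : Decidable (Pre_generate_triple_lattice k) := by unfold Pre_generate_triple_lattice; infer_instance
def pvWitness_generate_triple_lattice : Int := 3

def Spec_generate_triple_lattice (k : Int) (out : List (List (List Int))) : Prop := out = generate_triple_lattice_alt k
instance (k : Int) (out : List (List (List Int))) : Decidable (Spec_generate_triple_lattice k out) := by unfold Spec_generate_triple_lattice; infer_instance

-- ===== CLAIM (what is proved, stated in full; the proofs are below) =====
def Claim_equal_generate_triple_lattice : Prop := ∀ (k : Int), Dom_generate_triple_lattice k → Pre_generate_triple_lattice k → Spec_generate_triple_lattice k (generate_triple_lattice k)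

-- ===== LEMMAS AND PROOFS =====

-- the common row shape both sides produce: row i has entries (a*i + b*j) % m
def pvRow (K : Nat) (m a b : Int) (i : Int) : List Int :=
  (List.range K).map (fun j : Nat => PySem.Int.mod (a * i + b * (j : Int)) m)

def pvGrid (K : Nat) (m a b : Int) : List (List Int) :=
  (List.range K).map (fun i : Nat => pvRow K m a b (i : Int))

-- ((x % m) + s) % m = (x + s) % m, in PySem.Int.mod form, for positive m
lemma pvMod_add (m x s : Int) (hm : 0 < m) :
    PySem.Int.mod (PySem.Int.mod x m + s) m = PySem.Int.mod (x + s) m := by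
  simp only [PySem.Int.mod_eq_emod_of_pos hm, Int.emod_add_emod]

-- B's first-row loop invariant: after t steps, row = pvRow up to t and x = (b*t) % m
lemma pvFirstRow_inv {α : Type} (m b : Int) (hm : 0 < m) (l : List α) : ∀ (t : Nat),
    l.foldl (fun (st : List Int × Int) _ => (st.1 ++ [st.2], PySem.Int.mod (st.2 + b) m))
      ((List.range t).map (fun j : Nat => PySem.Int.mod (b * (j : Int)) m),
        PySem.Int.mod (b * (t : Int)) m)
    = ((List.range (t + l.length)).map (fun j : Nat => PySem.Int.mod (b * (j : Int)) m),
        PySem.Int.mod (b * ((t + l.length : Nat) : Int)) m) := by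
  induction l with
  | nil => simp
  | cons a l ih =>
    intro t
    simp only [List.foldl_cons]
    have h1 : (List.range t).map (fun j : Nat => PySem.Int.mod (b * (j : Int)) m)
        ++ [PySem.Int.mod (b * (t : Int)) m]
        = (List.range (t + 1)).map (fun j : Nat => PySem.Int.mod (b * (j : Int)) m) := by
      rw [List.range_succ, List.map_append]; simp
    have h2 : PySem.Int.mod (PySem.Int.mod (b * (t : Int)) m + b) m
        = PySem.Int.mod (b * ((t + 1 : Nat) : Int)) m := by
      rw [pvMod_add _ _ _ hm]; congr 1; push_cast; ring
    rw [h1, h2, ih (t + 1), List.length_cons,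
      show t + (l.length + 1) = t + 1 + l.length by omega]

-- B's first_row produces row 0 of the grid
lemma pvFirstRow (k m b : Int) (hk : 0 < k) (hm : 0 < m) :
    ((PySem.List.pyRange 0 k 1).foldl
      (fun (st : List Int × Int) _ => (st.1 ++ [st.2], PySem.Int.mod (st.2 + b) m))
      ([], 0)).1 = pvRow k.toNat m 1 b 0 := by
  have h0 : (([], (0 : Int)) : List Int × Int)
      = ((List.range 0).map (fun j : Nat => PySem.Int.mod (b * (j : Int)) m),
          PySem.Int.mod (b * ((0 : Nat) : Int)) m) := by
    simp [PySem.Int.mod_eq_emod_of_pos hm]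
  rw [h0, pvFirstRow_inv m b hm]
  simp only [pvRow, PySem.List.length_pyRange_one,
    show ((0 : Nat) + (k - 0).toNat) = k.toNat by omega]
  refine List.map_congr_left (fun j _ => ?_)
  congr 1; ring

-- stepping a row: adding a (mod m) elementwise advances the row index by one
lemma pvRow_step (K : Nat) (m a b : Int) (hm : 0 < m) (i : Nat) :
    (pvRow K m a b (i : Int)).map (fun x => PySem.Int.mod (x + a) m)
      = pvRow K m a b ((i + 1 : Nat) : Int) := by
  simp only [pvRow, List.map_map]
  refine List.map_congr_left (fun j _ => ?_)
  simp only [Function.comp_def]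
  rw [pvMod_add _ _ _ hm]; congr 1; push_cast; ring

-- B's develop loop invariant
lemma pvDevelop_inv {α : Type} (K : Nat) (m a b : Int) (hm : 0 < m) (l : List α) : ∀ (t : Nat),
    l.foldl (fun (st : List (List Int) × List Int) _ =>
        (st.1 ++ [st.2], st.2.map (fun x => PySem.Int.mod (x + a) m)))
      ((List.range t).map (fun i : Nat => pvRow K m a b (i : Int)), pvRow K m a b (t : Int))
    = ((List.range (t + l.length)).map (fun i : Nat => pvRow K m a b (i : Int)),
        pvRow K m a b ((t + l.length : Nat) : Int)) := by
  induction l with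
  | nil => simp
  | cons c l ih =>
    intro t
    simp only [List.foldl_cons]
    have h1 : (List.range t).map (fun i : Nat => pvRow K m a b (i : Int))
        ++ [pvRow K m a b (t : Int)]
        = (List.range (t + 1)).map (fun i : Nat => pvRow K m a b (i : Int)) := by
      rw [List.range_succ, List.map_append]; simp
    rw [h1, pvRow_step K m a b hm t, ih (t + 1), List.length_cons,
      show t + (l.length + 1) = t + 1 + l.length by omega]

-- B's develop, started from row 0, produces the full grid
lemma pvDevelop (k : Int) (K : Nat) (m a b : Int) (hk : (PySem.List.pyRange 0 k 1).length = K)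
    (hm : 0 < m) :
    ((PySem.List.pyRange 0 k 1).foldl
      (fun (st : List (List Int) × List Int) _ =>
        (st.1 ++ [st.2], st.2.map (fun x => PySem.Int.mod (x + a) m)))
      ([], pvRow K m a b 0)).1 = pvGrid K m a b := by
  have h0 : (([], pvRow K m a b 0) : List (List Int) × List Int)
      = ((List.range 0).map (fun i : Nat => pvRow K m a b (i : Int)),
          pvRow K m a b ((0 : Nat) : Int)) := by simp
  rw [h0, pvDevelop_inv K m a b hm]
  simp [pvGrid, hk]

-- pvRow with coefficient pair (1, b) at index 0 equals pvRow (a, b) at index 0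
lemma pvRow_zero (K : Nat) (m a a' b : Int) :
    pvRow K m a b 0 = pvRow K m a' b 0 := by
  simp [pvRow]

-- B equals the three grids, for positive k
lemma pvB_eq_grids (k : Int) (hk : 0 < k) :
    generate_triple_lattice_alt k =
      [pvGrid k.toNat (k * k) k 1, pvGrid k.toNat (k * k) 1 k,
        pvGrid k.toNat (k * k) k (k + 1)] := by
  have hm : 0 < k * k := by positivity
  have hlen : (PySem.List.pyRange 0 k 1).length = k.toNat := by
    rw [PySem.List.length_pyRange_one]; congr 1; omega
  unfold generate_triple_lattice_alt
  simp only
  rw [pvFirstRow k (k * k) 1 hk hm, pvFirstRow k (k * k) k hk hm,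
    pvFirstRow k (k * k) (k + 1) hk hm,
    pvRow_zero k.toNat (k * k) 1 k 1, pvRow_zero k.toNat (k * k) 1 1 k,
    pvRow_zero k.toNat (k * k) 1 k (k + 1),
    pvDevelop k k.toNat (k * k) k 1 hlen hm,
    pvDevelop k k.toNat (k * k) 1 k hlen hm,
    pvDevelop k k.toNat (k * k) k (k + 1) hlen hm]

-- range(0, k², k) lists the k block starts 0, k, 2k, … for positive k
lemma pyRange_step_blocks (k : Int) (hk : 0 < k) :
    PySem.List.pyRange 0 (k * k) k = List.map (fun t : Nat => k * (t : Int)) (List.range k.toNat) := by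
  have h1 : (0 : Int) < k * k := by positivity
  have h2 : (k * k - 0 + k - 1) / k = k := by
    rw [show k * k - 0 + k - 1 = (k - 1) + k * k by ring,
      Int.add_mul_ediv_left _ _ (by omega : k ≠ 0),
      Int.ediv_eq_zero_of_lt (by omega) (by omega)]
    simp
  rw [PySem.List.pyRange_of_pos _ _ hk, if_pos h1, h2]
  simp only [zero_add]

-- range(k) as a map over List.range
lemma pyRange_one_k (k : Int) :
    PySem.List.pyRange 0 k 1 = List.map (fun t : Nat => (t : Int)) (List.range k.toNat) := by
  rw [PySem.List.pyRange_one]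
  simp only [zero_add, Int.sub_zero]

-- for 0 ≤ i,j < k the affine value k*i + j is already reduced mod k²
lemma mod_affine (k i j : Int) (hk : 0 < k) (hi0 : 0 ≤ i) (hi : i < k) (hj0 : 0 ≤ j) (hj : j < k) :
    PySem.Int.mod (k * i + j) (k * k) = k * i + j := by
  rw [PySem.Int.mod_eq_emod_of_pos (by positivity)]
  apply Int.emod_eq_of_lt (by positivity)
  nlinarith

-- A equals the three grids, for positive k
lemma pvA_eq_grids (k : Int) (hk : 0 < k) :
    generate_triple_lattice k =
      [pvGrid k.toNat (k * k) k 1, pvGrid k.toNat (k * k) 1 k,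
        pvGrid k.toNat (k * k) k (k + 1)] := by
  unfold generate_triple_lattice
  simp only [PySem.List.foldl_append_singleton_eq_map, List.nil_append,
    pyRange_step_blocks k hk, pyRange_one_k, List.map_map, pvGrid, pvRow,
    List.cons.injEq, and_true]
  refine ⟨?_, ?_, ?_⟩
  · -- rep1: sequential blocks = (k*i + 1*j) % k²
    refine List.map_congr_left (fun t ht => ?_)
    rw [List.mem_range] at ht
    have htk : (t : Int) < k := by
      have := Int.toNat_of_nonneg hk.le
      omega
    simp only [Function.comp_def]
    rw [PySem.List.pyRange_one,
      show (k * (t : Int) + k - k * (t : Int)).toNat = k.toNat by omega]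
    refine List.map_congr_left (fun j hj => ?_)
    rw [List.mem_range] at hj
    have hjk : (j : Int) < k := by omega
    rw [show k * (t : Int) + (1 : Int) * (j : Int) = k * (t : Int) + (j : Int) by ring,
      mod_affine k _ _ hk (by positivity) htk (by positivity) hjk]
  · -- rep2: (i + j*k) % k² = (1*i + k*j) % k²
    refine List.map_congr_left (fun i _ => ?_)
    refine List.map_congr_left (fun j _ => ?_)
    simp only [Function.comp_def]
    congr 1
    ring
  · -- rep3: (i*k + j*(k+1)) % k² = (k*i + (k+1)*j) % k²
    refine List.map_congr_left (fun i _ => ?_)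
    refine List.map_congr_left (fun j _ => ?_)
    simp only [Function.comp_def]
    congr 1
    ring

lemma equal_of_neg (k : Int) (hk : k < 0) :
    generate_triple_lattice k = generate_triple_lattice_alt k := by
  unfold generate_triple_lattice generate_triple_lattice_alt
  have h1 : PySem.List.pyRange 0 (k * k) k = [] := by
    unfold PySem.List.pyRange
    have h0 : ¬ (0 : Int) < k := by omega
    have h2 : ¬ (k * k < 0) := by nlinarith
    simp [h0, h2]
  have h3 : PySem.List.pyRange 0 k 1 = [] := by
    rw [PySem.List.pyRange_one_eq_nil (by omega)]
  simp [h1, h3]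

-- ===== VERDICT (by name: the statement is the Claim_ definition above) =====
theorem generate_triple_lattice_spec : Claim_equal_generate_triple_lattice := by
  intro k _ hpre
  unfold Spec_generate_triple_lattice
  rcases lt_or_gt_of_ne hpre with h | h
  · exact equal_of_neg k h
  · rw [pvA_eq_grids k h, pvB_eq_grids k h]
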